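-- pv_equiv track=rewrite | github.com/stuycs-softdev-2014-2015/submissions-fall-2014 | 7/intro-proj1/Veronika Azzara/maps.py | make_other_maps
-- ===== SOURCE A (Python) =====
-- borough = ["MANHATTAN","QUEENS","BRONX","STATEN ISLAND","BROOKLYN"]
--
-- dborough = {"MANHATTAN":"Manhattan","QUEENS":"Queens","BRONX":"Bronx","STATEN ISLAND":"Staten+Island","BROOKLYN":"Brooklyn"}
--
-- def make_other_maps(data,value):
--     result = ""
--     maplist=[]
--     for item in borough:
--         for stuff in data:
--             if stuff[1] == value and stuff[2] == item and stuff[3] != "" and stuff[3]!= " ":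
--                 result+= "&markers=color:blue%7C"+stuff[3][1:-1]
--         maplist.append('http://maps.googleapis.com/maps/api/staticmap?center='+dborough[item]+',New+York,NY&zoom=11&size=640x640&maptype=roadmap'+result+'&sensor=false')
--         result = ""
--     return maplist
-- ===== SOURCE B (Python) =====
-- borough = ["MANHATTAN","QUEENS","BRONX","STATEN ISLAND","BROOKLYN"]
--
-- dborough = {"MANHATTAN":"Manhattan","QUEENS":"Queens","BRONX":"Bronx","STATEN ISLAND":"Staten+Island","BROOKLYN":"Brooklyn"}
--
-- def make_other_maps(data, value):
--     pairs = [(row[2], row[3][1:-1]) for row in data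
--              if row[1] == value and row[2] in borough and row[3] != "" and row[3] != " "]
--     groups = {}
--     for b, coord in pairs:
--         groups.setdefault(b, []).append(coord)
--     return ['http://maps.googleapis.com/maps/api/staticmap?center=' + dborough[b]
--             + ',New+York,NY&zoom=11&size=640x640&maptype=roadmap'
--             + "".join("&markers=color:blue%7C" + c for c in groups.get(b, []))
--             + '&sensor=false'
--             for b in borough]
-- ===== Notes on version B (the rewrite author's own statement) =====
-- stated objective: alternative
-- what changed: Replaces A's rescan of the whole data list once per borough (5 staged passes each accumulating a marker string) with a single comprehension extracting (borough, coord) pairs, one setdefault-grouping pass into a dict of lists, and a join-based emit pass over the fixed borough list.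
import Mathlib
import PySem

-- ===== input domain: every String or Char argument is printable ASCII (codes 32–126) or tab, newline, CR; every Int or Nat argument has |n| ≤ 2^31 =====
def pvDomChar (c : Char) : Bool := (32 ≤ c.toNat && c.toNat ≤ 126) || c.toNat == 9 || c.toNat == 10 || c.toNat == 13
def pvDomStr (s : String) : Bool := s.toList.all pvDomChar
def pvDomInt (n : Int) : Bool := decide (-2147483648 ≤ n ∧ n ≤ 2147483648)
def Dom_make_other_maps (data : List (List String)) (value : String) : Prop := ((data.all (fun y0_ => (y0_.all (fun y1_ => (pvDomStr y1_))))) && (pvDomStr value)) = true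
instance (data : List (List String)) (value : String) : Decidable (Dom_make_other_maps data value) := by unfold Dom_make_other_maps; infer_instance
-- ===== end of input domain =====

-- B replaces A's per-borough rescan of data (5 staged passes, each accumulating a string)
-- with one comprehension extracting (borough, coord) pairs, one setdefault-grouping pass,
-- and a join-based emit pass (objective: alternative decomposition).
-- module constant: borough = [...]
def pvBorough : List String := ["MANHATTAN","QUEENS","BRONX","STATEN ISLAND","BROOKLYN"]
-- module constant: dborough = {...}
def pvDBorough : PySem.Dict String String :=
  ((PySem.Dict.empty.insert "MANHATTAN" "Manhattan").insert "QUEENS" "Queens"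
    |>.insert "BRONX" "Bronx" |>.insert "STATEN ISLAND" "Staten+Island"
    |>.insert "BROOKLYN" "Brooklyn")

-- ===== PORT A =====
def make_other_maps (data : List (List String)) (value : String) : List String :=
  -- state (result, maplist); inner loop appends markers to result, outer appends the URL and resets result
  (pvBorough.foldl (fun (st : String × List String) item =>
      let result := data.foldl (fun r stuff =>
        if (PySem.List.pyGetD stuff 1 "" == value) && (PySem.List.pyGetD stuff 2 "" == item)
            && !(PySem.List.pyGetD stuff 3 "" == "") && !(PySem.List.pyGetD stuff 3 "" == " ")
        then r ++ ("&markers=color:blue%7C" ++ PySem.Str.slice (PySem.List.pyGetD stuff 3 "") (some 1) (some (-1)))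
        else r) st.1
      ("", st.2 ++ ["http://maps.googleapis.com/maps/api/staticmap?center=" ++ pvDBorough.getD item ""
          ++ ",New+York,NY&zoom=11&size=640x640&maptype=roadmap" ++ result ++ "&sensor=false"]))
    ("", [])).2

-- ===== PORT B =====
def make_other_maps_alt (data : List (List String)) (value : String) : List String :=
  -- pairs = [(row[2], row[3][1:-1]) for row in data if …]
  let pairs : List (String × String) := data.filterMap (fun row =>
    if (PySem.List.pyGetD row 1 "" == value) && pvBorough.contains (PySem.List.pyGetD row 2 "")
        && !(PySem.List.pyGetD row 3 "" == "") && !(PySem.List.pyGetD row 3 "" == " ")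
    then some (PySem.List.pyGetD row 2 "", PySem.Str.slice (PySem.List.pyGetD row 3 "") (some 1) (some (-1)))
    else none)
  -- for b, coord in pairs: groups.setdefault(b, []).append(coord)
  let groups : PySem.Dict String (List String) :=
    pairs.foldl (fun d p => d.modify p.1 [] (· ++ [p.2])) PySem.Dict.empty
  -- emit comprehension with "".join over groups.get(b, [])
  pvBorough.map (fun b =>
    "http://maps.googleapis.com/maps/api/staticmap?center=" ++ pvDBorough.getD b ""
      ++ ",New+York,NY&zoom=11&size=640x640&maptype=roadmap"
      ++ PySem.Str.join "" ((groups.getD b []).map (fun c => "&markers=color:blue%7C" ++ c))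
      ++ "&sensor=false")

-- ===== PRECONDITION & SPEC =====
-- Pre_ excludes exactly the inputs on which A (and B) raise IndexError: a row shorter than 2,
-- or shorter than 3 when its second field equals value, or shorter than 4 when additionally
-- its third field is one of the five boroughs.
def Pre_make_other_maps (data : List (List String)) (value : String) : Prop :=
  ∀ row ∈ data, 2 ≤ row.length ∧
    (row.getD 1 "" = value → 3 ≤ row.length ∧ (row.getD 2 "" ∈ pvBorough → 4 ≤ row.length))
instance (data : List (List String)) (value : String) : Decidable (Pre_make_other_maps data value) := by unfold Pre_make_other_maps; infer_instance
def pvWitness_make_other_maps : List (List String) × String :=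
  ([["x", "v", "MANHATTAN", "(40,-73)"], ["y", "w"]], "v")

def Spec_make_other_maps (data : List (List String)) (value : String) (out : List String) : Prop := out = make_other_maps_alt data value
instance (data : List (List String)) (value : String) (out : List String) : Decidable (Spec_make_other_maps data value out) := by unfold Spec_make_other_maps; infer_instance

-- ===== CLAIM (what is proved, stated in full; the proofs are below) =====
def Claim_equal_make_other_maps : Prop := ∀ (data : List (List String)) (value : String), Dom_make_other_maps data value → Pre_make_other_maps data value → Spec_make_other_maps data value (make_other_maps data value)

-- ===== LEMMAS AND PROOFS =====

-- "".join distributes over cons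
theorem pvJoin_cons (c : String) (l : List String) :
    PySem.Str.join "" (c :: l) = c ++ PySem.Str.join "" l := by
  apply String.toList_injective
  simp [PySem.Str.toList_join, PySem.Chars.join]
  cases l <;> simp [List.intercalate]

-- A's inner per-borough string fold equals the join over B's extracted-and-grouped coords for that borough
theorem pvInner (value item : String)
    (hitem : item ∈ (["MANHATTAN","QUEENS","BRONX","STATEN ISLAND","BROOKLYN"] : List String))
    (data : List (List String)) (r0 : String) :
    data.foldl (fun r stuff =>
        if (PySem.List.pyGetD stuff 1 "" == value) && (PySem.List.pyGetD stuff 2 "" == item)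
            && !(PySem.List.pyGetD stuff 3 "" == "") && !(PySem.List.pyGetD stuff 3 "" == " ")
        then r ++ ("&markers=color:blue%7C" ++ PySem.Str.slice (PySem.List.pyGetD stuff 3 "") (some 1) (some (-1)))
        else r) r0
    = r0 ++ PySem.Str.join ""
        ((((data.filterMap (fun row =>
              if (PySem.List.pyGetD row 1 "" == value)
                  && (["MANHATTAN","QUEENS","BRONX","STATEN ISLAND","BROOKLYN"] : List String).contains (PySem.List.pyGetD row 2 "")
                  && !(PySem.List.pyGetD row 3 "" == "") && !(PySem.List.pyGetD row 3 "" == " ")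
              then some (PySem.List.pyGetD row 2 "", PySem.Str.slice (PySem.List.pyGetD row 3 "") (some 1) (some (-1)))
              else none)).filter (fun p => p.1 == item)).map (·.2)).map
          (fun c => "&markers=color:blue%7C" ++ c)) := by
  induction data generalizing r0 with
  | nil => simp [PySem.Str.join, PySem.Chars.join, List.intercalate]
  | cons stuff rest ih =>
    simp only [List.foldl_cons, List.filterMap_cons]
    by_cases hA : ((PySem.List.pyGetD stuff 1 "" == value) && (PySem.List.pyGetD stuff 2 "" == item)
        && !(PySem.List.pyGetD stuff 3 "" == "") && !(PySem.List.pyGetD stuff 3 "" == " ")) = true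
    · obtain ⟨h1, h2, h3, h4⟩ : PySem.List.pyGetD stuff 1 "" = value ∧ PySem.List.pyGetD stuff 2 "" = item
          ∧ ¬ PySem.List.pyGetD stuff 3 "" = "" ∧ ¬ PySem.List.pyGetD stuff 3 "" = " " := by
        simpa [and_assoc] using hA
      have hB : ((PySem.List.pyGetD stuff 1 "" == value)
          && (["MANHATTAN","QUEENS","BRONX","STATEN ISLAND","BROOKLYN"] : List String).contains (PySem.List.pyGetD stuff 2 "")
          && !(PySem.List.pyGetD stuff 3 "" == "") && !(PySem.List.pyGetD stuff 3 "" == " ")) = true := by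
        simp [h1, h2, h3, h4, List.contains_eq_mem, hitem]
      rw [if_pos hA, if_pos hB, ih]
      simp only [List.filter_cons, h2, beq_self_eq_true, if_pos, List.map_cons]
      rw [pvJoin_cons]
      simp [String.append_assoc]
    · rw [if_neg hA]
      by_cases hB : ((PySem.List.pyGetD stuff 1 "" == value)
          && (["MANHATTAN","QUEENS","BRONX","STATEN ISLAND","BROOKLYN"] : List String).contains (PySem.List.pyGetD stuff 2 "")
          && !(PySem.List.pyGetD stuff 3 "" == "") && !(PySem.List.pyGetD stuff 3 "" == " ")) = true
      · obtain ⟨h1, hcont, h3, h4⟩ : PySem.List.pyGetD stuff 1 "" = value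
            ∧ (["MANHATTAN","QUEENS","BRONX","STATEN ISLAND","BROOKLYN"] : List String).contains (PySem.List.pyGetD stuff 2 "") = true
            ∧ ¬ PySem.List.pyGetD stuff 3 "" = "" ∧ ¬ PySem.List.pyGetD stuff 3 "" = " " := by
          simpa [and_assoc] using hB
        have h2 : (PySem.List.pyGetD stuff 2 "" == item) = false := by
          by_contra h
          rw [Bool.not_eq_false, beq_iff_eq] at h
          exact hA (by simp [h1, h, h3, h4])
        rw [if_pos hB, ih]
        simp [h2]
      · rw [if_neg hB, ih]

-- ===== VERDICT (by name: the statement is the Claim_ definition above) =====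
theorem make_other_maps_spec : Claim_equal_make_other_maps := by
  intro data value _ _
  unfold Spec_make_other_maps make_other_maps make_other_maps_alt pvBorough
  simp only [List.foldl_cons, List.foldl_nil, List.map_cons, List.map_nil]
  rw [pvInner value "MANHATTAN" (by decide) data,
      pvInner value "QUEENS" (by decide) data,
      pvInner value "BRONX" (by decide) data,
      pvInner value "STATEN ISLAND" (by decide) data,
      pvInner value "BROOKLYN" (by decide) data]
  simp [PySem.Dict.getD_foldl_modify_append]
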